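-- pv_equiv track=rewrite | github.com/nihilistau/shannon-prime | backends/torch/shannon_prime_sqfree.py | _is_sqfree_factorable
-- ===== SOURCE A (Python) =====
-- from typing import List, Tuple, Optional
--
-- _PRIMES = [2, 3, 5, 7, 11]
--
-- def _factors_into_primes(n: int, primes: List[int] = _PRIMES) -> bool:
--     """True if n factors completely into the given primes."""
--     if n <= 0:
--         return False
--     d = n
--     for p in primes:
--         while d % p == 0:
--             d //= p
--     return d == 1
--
-- def _is_sqfree_factorable(n: int, primes: List[int] = _PRIMES) -> bool:
--     """True if n is squarefree AND factors into the given primes."""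
--     if n <= 0 or not _factors_into_primes(n, primes):
--         return False
--     for p in primes:
--         c = 0
--         d = n
--         while d % p == 0:
--             d //= p
--             c += 1
--             if c > 1:
--                 return False
--     return True
-- ===== SOURCE B (Python) =====
-- _PRIMES = [2, 3, 5, 7, 11]
--
-- def _is_sqfree_factorable(n, primes=_PRIMES):
--     if n <= 0:
--         return False
--     d = n
--     for p in primes:
--         if d % p == 0:
--             d //= p
--             if d % p == 0:
--                 return False
--     return d == 1
-- ===== Notes on version B (the rewrite author's own statement) =====
-- stated objective: simpler
-- what changed: B makes a single pass that divides each prime out of a running quotient at most once (returning False immediately if the prime still divides), replacing A's helper-based full factorization scan plus a second per-prime exponent-counting rescan of n; equivalence needs the list entries to actually be primes, so Pre_ restricts to that natural domain.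
-- outside the precondition, e.g. on _is_sqfree_factorable(8, [4, 2]): A returns False, B returns True; on _is_sqfree_factorable(6, [1, 2, 3]): A does not finish within the time limit, B returns False; on _is_sqfree_factorable(5, [0, 5]): A raises ZeroDivisionError, B raises ZeroDivisionError
import Mathlib
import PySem

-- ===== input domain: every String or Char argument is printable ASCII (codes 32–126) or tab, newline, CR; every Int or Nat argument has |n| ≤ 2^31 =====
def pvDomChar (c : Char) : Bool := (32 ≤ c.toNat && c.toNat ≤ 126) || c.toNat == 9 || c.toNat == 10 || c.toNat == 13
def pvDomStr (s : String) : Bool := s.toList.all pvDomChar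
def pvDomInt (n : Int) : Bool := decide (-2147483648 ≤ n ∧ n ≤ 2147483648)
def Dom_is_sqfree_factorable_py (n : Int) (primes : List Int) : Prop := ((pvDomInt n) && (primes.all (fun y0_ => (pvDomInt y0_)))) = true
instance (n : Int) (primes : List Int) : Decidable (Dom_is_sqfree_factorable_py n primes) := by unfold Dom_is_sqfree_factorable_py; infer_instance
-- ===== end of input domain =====

-- B replaces A's helper-based full-factorization scan plus per-prime exponent rescan by a
-- single pass dividing each prime out of a running quotient at most once (simpler); Pre_
-- restricts the prime list to actual primes ≥ 2, the function's natural domain.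


-- ===== PORT A =====
-- `while d % p == 0: d //= p` — fueled; fuel d.natAbs + 1 suffices on Pre_ (each division at least halves |d|)
def pvDivAllA (p : Int) : Nat → Int → Int
  | 0, d => d
  | fuel + 1, d =>
    if PySem.Int.mod d p = 0 then pvDivAllA p fuel (PySem.Int.floordiv d p) else d

-- port of _factors_into_primes
def pvFactorsA (n : Int) (primes : List Int) : Bool :=
  if n ≤ 0 then false
  else (primes.foldl (fun d p => pvDivAllA p (d.natAbs + 1) d) n) == 1

-- `c = 0; d = n; while d % p == 0: d //= p; c += 1; if c > 1: return False` — fueled loop, true = no early return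
def pvCountA (p : Int) : Nat → Int → Int → Bool
  | 0, _, _ => true
  | fuel + 1, d, c =>
    if PySem.Int.mod d p = 0 then
      if c + 1 > 1 then false else pvCountA p fuel (PySem.Int.floordiv d p) (c + 1)
    else true

def is_sqfree_factorable_py (n : Int) (primes : List Int) : Bool :=
  if decide (n ≤ 0) || !pvFactorsA n primes then false
  else primes.all (fun p => pvCountA p (n.natAbs + 1) n 0)

-- ===== PORT B =====
def pvGoB : Int → List Int → Bool
  | d, [] => d == 1
  | d, p :: ps =>
    if PySem.Int.mod d p = 0 then
      if PySem.Int.mod (PySem.Int.floordiv d p) p = 0 then false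
      else pvGoB (PySem.Int.floordiv d p) ps
    else pvGoB d ps

def is_sqfree_factorable_py_alt (n : Int) (primes : List Int) : Bool :=
  if n ≤ 0 then false else pvGoB n primes

-- ===== PRECONDITION & SPEC =====
-- Pre_ restricts (for n > 0) to lists whose entries are genuine primes ≥ 2 — the function's
-- natural domain: on entries 0, 1 or -1 A raises ZeroDivisionError or loops forever, and on
-- composite or negative entries the two trial-division strategies legitimately diverge
-- (e.g. n = 8, primes = [4, 2]).  For n ≤ 0 both return False before touching primes.
def Pre_is_sqfree_factorable_py (n : Int) (primes : List Int) : Prop :=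
  n ≤ 0 ∨ ∀ p ∈ primes, 2 ≤ p ∧ p.natAbs.Prime
instance (n : Int) (primes : List Int) : Decidable (Pre_is_sqfree_factorable_py n primes) := by
  unfold Pre_is_sqfree_factorable_py; infer_instance

def pvWitness_is_sqfree_factorable_py : Int × List Int := (6, [2, 3, 5])

def Spec_is_sqfree_factorable_py (n : Int) (primes : List Int) (out : Bool) : Prop := out = is_sqfree_factorable_py_alt n primes
instance (n : Int) (primes : List Int) (out : Bool) : Decidable (Spec_is_sqfree_factorable_py n primes out) := by unfold Spec_is_sqfree_factorable_py; infer_instance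

-- ===== CLAIM (what is proved, stated in full; the proofs are below) =====
def Claim_equal_is_sqfree_factorable_py : Prop := ∀ (n : Int) (primes : List Int), Dom_is_sqfree_factorable_py n primes → Pre_is_sqfree_factorable_py n primes → Spec_is_sqfree_factorable_py n primes (is_sqfree_factorable_py n primes)

-- ===== LEMMAS AND PROOFS =====

-- "q is a positive prime" (as an Int)
def pvP (q : Int) : Prop := 0 < q ∧ Prime q

lemma pv_prime_eq {q p : Int} (hq : pvP q) (hp : pvP p) (h : q ∣ p) : q = p := by
  rcases Int.associated_iff.mp (hq.2.associated_of_dvd hp.2 h) with h1 | h1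
  · exact h1
  · exfalso; obtain ⟨hq1, _⟩ := hq; obtain ⟨hp1, _⟩ := hp; omega

-- q² ∣ p·m with q, p distinct positive primes forces q² ∣ m
lemma pv_sq_dvd_cancel {q p m : Int} (hq : pvP q) (hp : pvP p) (hne : q ≠ p)
    (h : q * q ∣ p * m) : q * q ∣ m := by
  have hqnp : ¬ q ∣ p := fun hd => hne (pv_prime_eq hq hp hd)
  have hq0 : q ≠ 0 := by have := hq.1; omega
  have h1 : q ∣ m := ((hq.2.dvd_mul.mp ((dvd_mul_left q q).trans h)).resolve_left hqnp)
  obtain ⟨e, rfl⟩ := h1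
  have h2 : q ∣ p * e := by
    have h' : q * q ∣ q * (p * e) := by
      have heq : p * (q * e) = q * (p * e) := by ring
      rwa [heq] at h
    exact (mul_dvd_mul_iff_left hq0).mp h'
  have h3 : q ∣ e := (hq.2.dvd_mul.mp h2).resolve_left hqnp
  exact mul_dvd_mul_left q h3

-- no positive prime divides d (0 < d) iff d = 1
lemma pv_no_prime_dvd_iff {d : Int} (hd : 0 < d) :
    (∀ q, pvP q → ¬ q ∣ d) ↔ d = 1 := by
  constructor
  · intro h
    by_contra hne
    have h1 : d.natAbs ≠ 1 := by omega
    obtain ⟨p, hp, hpd⟩ := Nat.exists_prime_and_dvd h1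
    have hq : pvP (p : Int) := ⟨by exact_mod_cast hp.pos, Nat.prime_iff_prime_int.mp hp⟩
    have hdvd : (p : Int) ∣ d := by
      have h2 : (p : Int) ∣ (d.natAbs : Int) := Int.natCast_dvd_natCast.mpr hpd
      rwa [Int.natAbs_of_nonneg (by omega)] at h2
    exact h _ hq hdvd
  · rintro rfl q hq hdvd
    exact hq.2.not_unit (isUnit_of_dvd_one hdvd)

lemma pv_divAll_spec {p : Int} (hp : 2 ≤ p) :
    ∀ (fuel : Nat) (d : Int), 0 < d → d.natAbs < fuel →
      0 < pvDivAllA p fuel d ∧ ¬ p ∣ pvDivAllA p fuel d ∧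
        ∃ k : Nat, d = pvDivAllA p fuel d * p ^ k := by
  intro fuel
  induction fuel with
  | zero => intro d _ h; omega
  | succ f ih =>
    intro d hd hfuel
    by_cases hpd : p ∣ d
    · obtain ⟨m, rfl⟩ := hpd
      have hp0 : p ≠ 0 := by omega
      have hm : 0 < m := by nlinarith
      have hdiv : PySem.Int.floordiv (p * m) p = m := by
        rw [PySem.Int.floordiv_eq_ediv_of_pos (by omega)]
        exact Int.mul_ediv_cancel_left m hp0
      have hmod : PySem.Int.mod (p * m) p = 0 :=
        (PySem.Int.mod_eq_zero_iff_dvd _ _).mpr ⟨m, rfl⟩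
      have habs : m.natAbs < f := by
        have h2 : 2 ≤ p.natAbs := by omega
        nlinarith [Int.natAbs_mul p m, m.natAbs_pos.mpr (by omega : m ≠ 0)]
      obtain ⟨h1, h2, k, hk⟩ := ih m hm habs
      simp only [pvDivAllA, hmod, hdiv, if_true]
      refine ⟨h1, h2, k + 1, ?_⟩
      rw [pow_succ]
      calc p * m = p * (pvDivAllA p f m * p ^ k) := by rw [← hk]
        _ = pvDivAllA p f m * (p ^ k * p) := by ring
    · have hmod : PySem.Int.mod d p ≠ 0 := fun h =>
        hpd ((PySem.Int.mod_eq_zero_iff_dvd _ _).mp h)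
      simp only [pvDivAllA, if_neg hmod]
      exact ⟨hd, hpd, 0, by ring⟩

-- the count loop with fuel ≥ 2 returns false exactly on p² ∣ d
lemma pv_count_spec {p : Int} (hp : 2 ≤ p) (f : Nat) (d : Int) :
    pvCountA p (f + 2) d 0 = true ↔ ¬ p * p ∣ d := by
  have hp0 : p ≠ 0 := by omega
  by_cases hpd : p ∣ d
  · obtain ⟨m, rfl⟩ := hpd
    have hmod : PySem.Int.mod (p * m) p = 0 :=
      (PySem.Int.mod_eq_zero_iff_dvd _ _).mpr ⟨m, rfl⟩
    have hdiv : PySem.Int.floordiv (p * m) p = m := by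
      rw [PySem.Int.floordiv_eq_ediv_of_pos (by omega)]
      exact Int.mul_ediv_cancel_left m hp0
    by_cases hpm : p ∣ m
    · have hmod2 : PySem.Int.mod m p = 0 := (PySem.Int.mod_eq_zero_iff_dvd _ _).mpr hpm
      simp [pvCountA, hmod, hdiv, hmod2, mul_dvd_mul_iff_left hp0, hpm]
    · have hmod2 : PySem.Int.mod m p ≠ 0 := fun h =>
        hpm ((PySem.Int.mod_eq_zero_iff_dvd _ _).mp h)
      simp [pvCountA, hmod, hdiv, hmod2, mul_dvd_mul_iff_left hp0, hpm]
  · have hmod : PySem.Int.mod d p ≠ 0 := fun h =>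
      hpd ((PySem.Int.mod_eq_zero_iff_dvd _ _).mp h)
    simp [pvCountA, hmod]
    exact fun h => hpd (dvd_trans (dvd_mul_left p p) h)

-- first spec component: all positive-prime divisors of d lie in ps
def pvS1 (d : Int) (ps : List Int) : Prop := ∀ q, pvP q → q ∣ d → q ∈ ps

-- second spec component: d is squarefree (w.r.t. positive primes)
def pvS2 (d : Int) : Prop := ∀ q, pvP q → ¬ q * q ∣ d

-- entries of Pre_ lists are positive primes
lemma pv_mem_P {p : Int} (h : 2 ≤ p ∧ p.natAbs.Prime) : pvP p :=
  ⟨by omega, Int.prime_iff_natAbs_prime.mpr h.2⟩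

-- A's fold in _factors_into_primes reaches 1 iff pvS1
lemma pv_factors_fold_spec :
    ∀ (ps : List Int) (d : Int), 0 < d → (∀ p ∈ ps, 2 ≤ p ∧ p.natAbs.Prime) →
      (ps.foldl (fun d p => pvDivAllA p (d.natAbs + 1) d) d = 1 ↔ pvS1 d ps) := by
  intro ps
  induction ps with
  | nil =>
    intro d hd _
    simpa [pvS1] using (pv_no_prime_dvd_iff hd).symm
  | cons p ps ih =>
    intro d hd hgood
    have hp := hgood p (by simp)
    have hPp := pv_mem_P hp
    obtain ⟨hr, hrnd, k, hk⟩ := pv_divAll_spec hp.1 (d.natAbs + 1) d hd (by omega)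
    set r := pvDivAllA p (d.natAbs + 1) d with hrdef
    rw [List.foldl_cons, ih r hr (fun q hq => hgood q (by simp [hq]))]
    constructor
    · intro h q hq hqd
      by_cases hqp : q = p
      · simp [hqp]
      · have hqr : q ∣ r := by
          rcases hq.2.dvd_mul.mp (hk ▸ hqd) with h1 | h1
          · exact h1
          · exact absurd (pv_prime_eq hq hPp (hq.2.dvd_of_dvd_pow h1)) hqp
        simp [h q hq hqr]
    · intro h q hq hqr
      have hqd : q ∣ d := hk ▸ hqr.mul_right _
      rcases List.mem_cons.mp (h q hq hqd) with h1 | h1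
      · exact absurd (h1 ▸ hqr) hrnd
      · exact h1

-- B's single pass computes pvS1 ∧ pvS2
lemma pv_goB_spec :
    ∀ (ps : List Int) (d : Int), 0 < d → (∀ p ∈ ps, 2 ≤ p ∧ p.natAbs.Prime) →
      (pvGoB d ps = true ↔ pvS1 d ps ∧ pvS2 d) := by
  intro ps
  induction ps with
  | nil =>
    intro d hd _
    simp only [pvGoB, beq_iff_eq, pvS1, pvS2, List.not_mem_nil]
    constructor
    · rintro rfl
      exact ⟨fun q hq hqd => absurd (isUnit_of_dvd_one hqd) hq.2.not_unit,
             fun q hq hqd => hq.2.not_unit (isUnit_of_dvd_one ((dvd_mul_left q q).trans hqd))⟩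
    · intro h
      exact (pv_no_prime_dvd_iff hd).mp (fun q hq hqd => h.1 q hq hqd)
  | cons p ps ih =>
    intro d hd hgood
    have hp := hgood p (by simp)
    have hPp := pv_mem_P hp
    have hp0 : p ≠ 0 := by have := hp.1; omega
    by_cases hpd : p ∣ d
    · obtain ⟨m, rfl⟩ := hpd
      have hm : 0 < m := by nlinarith [hp.1]
      have hmod : PySem.Int.mod (p * m) p = 0 :=
        (PySem.Int.mod_eq_zero_iff_dvd _ _).mpr ⟨m, rfl⟩
      have hdiv : PySem.Int.floordiv (p * m) p = m := by
        rw [PySem.Int.floordiv_eq_ediv_of_pos (by have := hp.1; omega)]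
        exact Int.mul_ediv_cancel_left m hp0
      by_cases hpm : p ∣ m
      · have hmod2 : PySem.Int.mod m p = 0 := (PySem.Int.mod_eq_zero_iff_dvd _ _).mpr hpm
        simp only [pvGoB, hmod, hdiv, hmod2, if_true]
        constructor
        · intro h; exact absurd h (by simp)
        · rintro ⟨_, h2⟩
          exact absurd (mul_dvd_mul_left p hpm) (h2 p hPp)
      · have hmod2 : PySem.Int.mod m p ≠ 0 := fun h =>
          hpm ((PySem.Int.mod_eq_zero_iff_dvd _ _).mp h)
        simp only [pvGoB, hmod, hdiv, if_neg hmod2, if_true]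
        rw [ih m hm (fun q hq => hgood q (by simp [hq]))]
        constructor
        · rintro ⟨h1, h2⟩
          constructor
          · intro q hq hqd
            by_cases hqp : q = p
            · simp [hqp]
            · have hqm : q ∣ m := by
                rcases hq.2.dvd_mul.mp hqd with h | h
                · exact absurd (pv_prime_eq hq hPp h) hqp
                · exact h
              simp [h1 q hq hqm]
          · intro q hq hsq
            by_cases hqp : q = p
            · subst hqp
              exact hpm ((mul_dvd_mul_iff_left hp0).mp hsq)
            · exact h2 q hq (pv_sq_dvd_cancel hq hPp hqp hsq)
        · rintro ⟨h1, h2⟩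
          constructor
          · intro q hq hqm
            have hqd : q ∣ p * m := hqm.mul_left p
            rcases List.mem_cons.mp (h1 q hq hqd) with h | h
            · exact absurd (h ▸ hqm) hpm
            · exact h
          · intro q hq hsq
            exact h2 q hq (hsq.mul_left p)
    · have hmod : PySem.Int.mod d p ≠ 0 := fun h =>
        hpd ((PySem.Int.mod_eq_zero_iff_dvd _ _).mp h)
      simp only [pvGoB, if_neg hmod]
      rw [ih d hd (fun q hq => hgood q (by simp [hq]))]
      constructor
      · rintro ⟨h1, h2⟩
        exact ⟨fun q hq hqd => List.mem_cons_of_mem p (h1 q hq hqd), h2⟩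
      · rintro ⟨h1, h2⟩
        refine ⟨fun q hq hqd => ?_, h2⟩
        rcases List.mem_cons.mp (h1 q hq hqd) with h | h
        · exact absurd (h ▸ hqd) hpd
        · exact h

-- A's Bool result characterized: pvS1 n primes ∧ pvS2 n (for n > 0 on Pre_ lists)
lemma pv_A_spec {n : Int} {primes : List Int} (hn : 0 < n)
    (hgood : ∀ p ∈ primes, 2 ≤ p ∧ p.natAbs.Prime) :
    (is_sqfree_factorable_py n primes = true ↔ pvS1 n primes ∧ pvS2 n) := by
  have hf : pvFactorsA n primes = true ↔ pvS1 n primes := by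
    unfold pvFactorsA
    rw [if_neg (by omega)]
    simpa using pv_factors_fold_spec primes n hn hgood
  have hfuel : n.natAbs + 1 = (n.natAbs - 1) + 2 := by omega
  have hall : (primes.all (fun p => pvCountA p (n.natAbs + 1) n 0) = true) ↔
      ∀ p ∈ primes, ¬ p * p ∣ n := by
    rw [List.all_eq_true]
    constructor
    · intro h p hpmem
      exact (pv_count_spec (hgood p hpmem).1 (n.natAbs - 1) n).mp (by rw [← hfuel]; exact h p hpmem)
    · intro h p hpmem
      rw [hfuel]
      exact (pv_count_spec (hgood p hpmem).1 (n.natAbs - 1) n).mpr (h p hpmem)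
  unfold is_sqfree_factorable_py
  by_cases hF : pvFactorsA n primes = true
  · have hc : (decide (n ≤ 0) || !pvFactorsA n primes) = false := by
      rw [hF]; simp; omega
    rw [hc]
    simp only [Bool.false_eq_true, if_false]
    rw [hall]
    have hs1 := hf.mp hF
    constructor
    · intro h
      refine ⟨hs1, fun q hq hsq => ?_⟩
      exact h q (hs1 q hq ((dvd_mul_left q q).trans hsq)) hsq
    · rintro ⟨_, h2⟩ p hpmem _
      exact (h2 p (pv_mem_P (hgood p hpmem))) ‹p * p ∣ n›
  · have hc : (decide (n ≤ 0) || !pvFactorsA n primes) = true := by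
      simp [hF]
    rw [hc]
    simp only [if_true]
    constructor
    · intro h; exact absurd h (by simp)
    · rintro ⟨h1, _⟩
      exact absurd (hf.mpr h1) hF

-- B's Bool result characterized the same way
lemma pv_B_spec {n : Int} {primes : List Int} (hn : 0 < n)
    (hgood : ∀ p ∈ primes, 2 ≤ p ∧ p.natAbs.Prime) :
    (is_sqfree_factorable_py_alt n primes = true ↔ pvS1 n primes ∧ pvS2 n) := by
  unfold is_sqfree_factorable_py_alt
  rw [if_neg (by omega)]
  exact pv_goB_spec primes n hn hgood


-- ===== VERDICT (by name: the statement is the Claim_ definition above) =====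
theorem is_sqfree_factorable_py_spec : Claim_equal_is_sqfree_factorable_py := by
  intro n primes _ hpre
  unfold Spec_is_sqfree_factorable_py
  by_cases hn' : n ≤ 0
  · unfold is_sqfree_factorable_py is_sqfree_factorable_py_alt
    rw [if_pos hn']
    simp [hn']
  · have hn : 0 < n := by omega
    have hgood : ∀ p ∈ primes, 2 ≤ p ∧ p.natAbs.Prime :=
      hpre.resolve_left (by omega)
    rw [Bool.eq_iff_iff, pv_A_spec hn hgood, pv_B_spec hn hgood]
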